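-- pv_equiv track=rewrite | github.com/SowmyaKoneti/Leetcode | grid_condtion.py | satisfiesConditions
-- ===== SOURCE A (Python) =====
-- from typing import List
--
-- def satisfiesConditions(grid: List[List[int]]) -> bool:
--     a=[]
--     count=0
--     for i in range(len(grid)):
--         for j in range(len(grid[i])-1):
--             if(i!=(len(grid)-1)):
--                 if grid[i][j] == grid[i+1][j] and grid[i][j] != grid[i][j+1]:
--                     a.append(1)
--                 else:
--                     a.append(0)
--                 count+=1
--             elif(i==(len(grid)-1)):
--                 if grid[i][j] != grid[i][j+1]:
--                     a.append(1)
--                 else: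
--                     a.append(0)
--                 count+=1
--         if i < len(grid) - 1:
--             if grid[i][-1] == grid[i + 1][-1]:
--                 a.append(1)
--             else:
--                 a.append(0)
--             count += 1
--     if sum(a)==count:
--         return True
--     return False
-- ===== SOURCE B (Python) =====
-- def satisfiesConditions(grid):
--     pairs = list(zip(grid, grid[1:]))
--     down = all(r[j] == s[j] for r, s in pairs for j in range(len(r) - 1))
--     last = all(r[-1] == s[-1] for r, s in pairs)
--     right = all(r[j] != r[j + 1] for r in grid for j in range(len(r) - 1))
--     return down and last and right
-- ===== Notes on version B (the rewrite author's own statement) =====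
-- stated objective: simpler
-- what changed: A builds a 0/1 tally list per cell-check and compares its sum to a counter; B decomposes the task into three separate whole-grid all() passes (column-equality over adjacent row pairs via zip, last-element equality, horizontal inequality) and ANDs the three flags.
import Mathlib
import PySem

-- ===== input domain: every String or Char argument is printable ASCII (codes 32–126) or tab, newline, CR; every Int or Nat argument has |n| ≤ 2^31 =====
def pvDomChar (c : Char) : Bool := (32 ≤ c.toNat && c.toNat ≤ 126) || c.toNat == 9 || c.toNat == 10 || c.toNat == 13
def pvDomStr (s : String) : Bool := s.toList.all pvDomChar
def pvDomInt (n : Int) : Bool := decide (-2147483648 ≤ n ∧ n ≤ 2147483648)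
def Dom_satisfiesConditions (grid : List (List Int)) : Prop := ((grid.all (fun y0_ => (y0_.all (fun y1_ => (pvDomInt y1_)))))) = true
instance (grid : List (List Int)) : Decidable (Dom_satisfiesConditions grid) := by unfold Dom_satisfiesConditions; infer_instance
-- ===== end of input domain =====

-- B replaces A's per-cell 0/1 tally list (whose sum is compared to a counter) by three
-- whole-grid boolean passes (down-equality over adjacent row pairs, last-element equality,
-- horizontal inequality) ANDed together; objective: simpler.

-- ===== PORT A =====
-- Literal port of A. Indexing grid[i], grid[i+1], row[j], row[j+1] is rendered with getD;
-- inside Pre_ every such access is in range (Python raises IndexError exactly outside Pre_),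
-- so the defaults are never consulted there.  row[-1] is rendered as getLastD 0, exact on
-- the nonempty rows Pre_ guarantees whenever that access is reached.
def satisfiesConditions (grid : List (List Int)) : Bool :=
  let n := grid.length
  let st :=
    (List.range n).foldl
      (fun st i =>
        let row := grid.getD i []
        let st :=
          (List.range (row.length - 1)).foldl
            (fun st j =>
              if i ≠ n - 1 then
                (st.1 ++ [if row.getD j 0 == (grid.getD (i+1) []).getD j 0
                             && !(row.getD j 0 == row.getD (j+1) 0) then (1 : Int) else 0],
                 st.2 + 1)
              else
                (st.1 ++ [if !(row.getD j 0 == row.getD (j+1) 0) then (1 : Int) else 0],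
                 st.2 + 1))
            st
        if i < n - 1 then
          (st.1 ++ [if row.getLastD 0 == (grid.getD (i+1) []).getLastD 0 then (1 : Int) else 0],
           st.2 + 1)
        else st)
      (([] : List Int), (0 : Int))
  st.1.sum == st.2

-- ===== PORT B =====
-- Literal port of Source B: zip of the grid with grid[1:] (= drop 1), three all-passes.
def satisfiesConditions_alt (grid : List (List Int)) : Bool :=
  let pairs := grid.zip (grid.drop 1)
  let down := pairs.all fun rs =>
    (List.range (rs.1.length - 1)).all fun j => rs.1.getD j 0 == rs.2.getD j 0
  let lastc := pairs.all fun rs => rs.1.getLastD 0 == rs.2.getLastD 0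
  let right := grid.all fun r =>
    (List.range (r.length - 1)).all fun j => !(r.getD j 0 == r.getD (j+1) 0)
  down && lastc && right

-- ===== PRECONDITION & SPEC =====
-- Pre_ is exactly the set of inputs on which the Python A returns (outside it A raises
-- IndexError: an empty row while another row follows, or a row more than one shorter than
-- the row above it).
def Pre_satisfiesConditions (grid : List (List Int)) : Prop :=
  grid.length ≤ 1 ∨
    ((∀ r ∈ grid, r ≠ []) ∧
     ∀ i < grid.length - 1, (grid.getD i []).length - 1 ≤ (grid.getD (i+1) []).length)
instance (grid : List (List Int)) : Decidable (Pre_satisfiesConditions grid) := by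
  unfold Pre_satisfiesConditions; infer_instance

def pvWitness_satisfiesConditions : List (List Int) := [[1, 2], [1, 3]]

def Spec_satisfiesConditions (grid : List (List Int)) (out : Bool) : Prop := out = satisfiesConditions_alt grid
instance (grid : List (List Int)) (out : Bool) : Decidable (Spec_satisfiesConditions grid out) := by unfold Spec_satisfiesConditions; infer_instance

-- ===== CLAIM (what is proved, stated in full; the proofs are below) =====
def Claim_equal_satisfiesConditions : Prop := ∀ (grid : List (List Int)), Dom_satisfiesConditions grid → Pre_satisfiesConditions grid → Spec_satisfiesConditions grid (satisfiesConditions grid)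

-- ===== LEMMAS AND PROOFS =====

-- the three elementary cell checks both programs perform, indexed by row/column
def dchk (grid : List (List Int)) (i j : Nat) : Bool :=
  (grid.getD i []).getD j 0 == (grid.getD (i+1) []).getD j 0
def lchk (grid : List (List Int)) (i : Nat) : Bool :=
  (grid.getD i []).getLastD 0 == (grid.getD (i+1) []).getLastD 0
def rchk (grid : List (List Int)) (i j : Nat) : Bool :=
  !((grid.getD i []).getD j 0 == (grid.getD i []).getD (j+1) 0)
def gbits (grid : List (List Int)) (i : Nat) : List Int :=
  (if i ≠ grid.length - 1 then
     (List.range ((grid.getD i []).length - 1)).map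
       (fun j => if dchk grid i j && rchk grid i j then (1 : Int) else 0)
   else
     (List.range ((grid.getD i []).length - 1)).map
       (fun j => if rchk grid i j then (1 : Int) else 0))
  ++ (if i < grid.length - 1 then [if lchk grid i then (1 : Int) else 0] else [])
theorem fold_bits {α : Type} (L : List α) (b : α → Int) (st : List Int × Int) :
    L.foldl (fun st x => (st.1 ++ [b x], st.2 + 1)) st = (st.1 ++ L.map b, st.2 + L.length) := by
  induction L generalizing st with
  | nil => simp
  | cons x t ih =>
    simp only [List.foldl_cons, ih, List.map_cons, List.length_cons]
    refine Prod.ext (by simp) (by push_cast; ring)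
theorem fold_blocks {α : Type} (L : List α) (g : α → List Int) (st : List Int × Int) :
    L.foldl (fun st x => (st.1 ++ g x, st.2 + ((g x).length : Int))) st
      = (st.1 ++ L.flatMap g, st.2 + ((L.flatMap g).length : Int)) := by
  induction L generalizing st with
  | nil => simp
  | cons x t ih =>
    simp only [List.foldl_cons, ih, List.flatMap_cons, List.length_append]
    refine Prod.ext (by simp) (by push_cast; ring)

theorem A_bits (grid : List (List Int)) :
    satisfiesConditions grid
      = (((List.range grid.length).flatMap (gbits grid)).sum
          == ((((List.range grid.length).flatMap (gbits grid)).length : Int))) := by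
  have hstep :
      (fun (st : List Int × Int) (i : Nat) =>
        let row := grid.getD i []
        let st :=
          (List.range (row.length - 1)).foldl
            (fun st j =>
              if i ≠ grid.length - 1 then
                (st.1 ++ [if row.getD j 0 == (grid.getD (i+1) []).getD j 0
                             && !(row.getD j 0 == row.getD (j+1) 0) then (1 : Int) else 0],
                 st.2 + 1)
              else
                (st.1 ++ [if !(row.getD j 0 == row.getD (j+1) 0) then (1 : Int) else 0],
                 st.2 + 1))
            st
        if i < grid.length - 1 then
          (st.1 ++ [if row.getLastD 0 == (grid.getD (i+1) []).getLastD 0 then (1 : Int) else 0],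
           st.2 + 1)
        else st)
      = (fun st i => (st.1 ++ gbits grid i, st.2 + ((gbits grid i).length : Int))) := by
    funext st i
    by_cases h1 : i ≠ grid.length - 1 <;> by_cases h2 : i < grid.length - 1 <;>
      simp only [h1, h2, if_true, if_false, ite_true, ite_false, not_false_iff, gbits,
        dchk, rchk, fold_bits, lchk, ite_not, if_neg, if_pos] <;>
      simp [h1, h2] <;>
      push_cast <;> try ring
  unfold satisfiesConditions
  simp only [hstep, fold_blocks]
  simp

theorem sum_le_length (L : List Int) (h : ∀ x ∈ L, x ≤ 1) : L.sum ≤ (L.length : Int) := by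
  induction L with
  | nil => simp
  | cons x t ih =>
    have hx := h x (by simp)
    have ht := ih (fun y hy => h y (by simp [hy]))
    simp only [List.sum_cons, List.length_cons]
    push_cast
    omega
theorem sum_eq_length_iff (L : List Int) (h : ∀ x ∈ L, x = 0 ∨ x = 1) :
    (L.sum = (L.length : Int)) ↔ ∀ x ∈ L, x = 1 := by
  induction L with
  | nil => simp
  | cons x t ih =>
    have hx := h x (by simp)
    have ht : ∀ y ∈ t, y = 0 ∨ y = 1 := fun y hy => h y (by simp [hy])
    have hle := sum_le_length t (fun y hy => by rcases ht y hy with h' | h' <;> omega)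
    simp only [List.sum_cons, List.length_cons, List.mem_cons]
    constructor
    · intro he
      have hxx : x = 1 := by push_cast at he; omega
      have h2 : t.sum = (t.length : Int) := by push_cast at he; omega
      exact fun y hy => hy.elim (fun h' => h' ▸ hxx) (fun h' => (ih ht).mp h2 y h')
    · intro hall
      have hxx : x = 1 := hall x (Or.inl rfl)
      have h2 : t.sum = (t.length : Int) := (ih ht).mpr (fun y hy => hall y (Or.inr hy))
      push_cast
      omega

theorem gbits_mem01 (grid : List (List Int)) (i : Nat) :
    ∀ x ∈ gbits grid i, x = 0 ∨ x = 1 := by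
  intro x hx
  unfold gbits at hx
  rcases List.mem_append.mp hx with h | h
  · split_ifs at h
    · obtain ⟨j, -, rfl⟩ := List.mem_map.mp h
      split_ifs <;> simp
    · obtain ⟨j, -, rfl⟩ := List.mem_map.mp h
      split_ifs <;> simp
  · by_cases hc : i < grid.length - 1
    · rw [if_pos hc] at h
      simp only [List.mem_singleton] at h
      subst h; split_ifs <;> simp
    · rw [if_neg hc] at h
      simp at h

theorem gbits_all_one (grid : List (List Int)) (i : Nat) :
    (∀ x ∈ gbits grid i, x = 1) ↔
      ((i ≠ grid.length - 1 →
          ∀ j < (grid.getD i []).length - 1, (dchk grid i j && rchk grid i j) = true) ∧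
       (i = grid.length - 1 →
          ∀ j < (grid.getD i []).length - 1, rchk grid i j = true) ∧
       (i < grid.length - 1 → lchk grid i = true)) := by
  unfold gbits
  by_cases h1 : i = grid.length - 1
  · by_cases h2 : i < grid.length - 1
    · exact absurd h2 (by omega)
    · simp [h1, h2]
  · by_cases h2 : i < grid.length - 1
    · simp [h1, h2]
      constructor
      · intro h
        refine ⟨fun j hj => ?_, ?_⟩
        · have := h _ (Or.inl ⟨j, hj, rfl⟩)
          split_ifs at this with hc
          · exact hc
          · exact absurd this (by norm_num)
        · have := h _ (Or.inr rfl)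
          split_ifs at this with hc
          · exact hc
          · exact absurd this (by norm_num)
      · rintro ⟨ha, hb⟩ x (⟨j, hj, rfl⟩ | rfl)
        · simp [(ha j hj).1, (ha j hj).2]
        · simp [hb]
    · simp [h1, h2]

theorem forall_zip_tail (grid : List (List Int)) (P : List Int → List Int → Prop) :
    (∀ rs ∈ grid.zip (grid.drop 1), P rs.1 rs.2) ↔
      ∀ i < grid.length - 1, P (grid.getD i []) (grid.getD (i+1) []) := by
  constructor
  · intro h i hi
    have h1 : i < grid.length := by omega
    have h2 : i + 1 < grid.length := by omega
    have hz : i < (grid.zip (grid.drop 1)).length := by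
      simp [List.length_zip] <;> omega
    have := h ((grid.zip (grid.drop 1))[i]) (List.getElem_mem hz)
    rw [List.getElem_zip] at this
    have hd : (grid.drop 1)[i]'(by simp; omega) = grid[i+1] := by
      rw [List.getElem_drop]; congr 1; omega
    rw [hd] at this
    rwa [List.getD_eq_getElem grid [] h1, List.getD_eq_getElem grid [] h2]
  · intro h rs hrs
    obtain ⟨i, hz, rfl⟩ := List.mem_iff_getElem.mp hrs
    have hzl : (grid.zip (grid.drop 1)).length = grid.length - 1 := by
      simp [List.length_zip] <;> omega
    have hi : i < grid.length - 1 := by omega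
    have h1 : i < grid.length := by omega
    have h2 : i + 1 < grid.length := by omega
    have := h i hi
    rw [List.getD_eq_getElem grid [] h1, List.getD_eq_getElem grid [] h2] at this
    rw [List.getElem_zip]
    have hd : (grid.drop 1)[i]'(by simp; omega) = grid[i+1] := by
      rw [List.getElem_drop]; congr 1; omega
    simpa [hd] using this

theorem forall_mem_idx (grid : List (List Int)) (Q : List Int → Prop) :
    (∀ r ∈ grid, Q r) ↔ ∀ i < grid.length, Q (grid.getD i []) := by
  constructor
  · intro h i hi
    rw [List.getD_eq_getElem grid [] hi]
    exact h _ (List.getElem_mem hi)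
  · intro h r hr
    obtain ⟨i, hi, rfl⟩ := List.mem_iff_getElem.mp hr
    have := h i hi
    rwa [List.getD_eq_getElem grid [] hi] at this

theorem B_char (grid : List (List Int)) :
    satisfiesConditions_alt grid = true ↔
      ((∀ i < grid.length - 1, ∀ j < (grid.getD i []).length - 1, dchk grid i j = true) ∧
       (∀ i < grid.length - 1, lchk grid i = true) ∧
       (∀ i < grid.length, ∀ j < (grid.getD i []).length - 1, rchk grid i j = true)) := by
  unfold satisfiesConditions_alt
  simp only [Bool.and_eq_true, List.all_eq_true, List.mem_range]
  constructor
  · rintro ⟨⟨hd, hl⟩, hr⟩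
    refine ⟨?_, ?_, ?_⟩
    · intro i hi j hj
      have := (forall_zip_tail grid (fun r s =>
        ∀ j < r.length - 1, (r.getD j 0 == s.getD j 0) = true)).mp
        (fun rs hrs j hj => hd rs hrs j hj) i hi j hj
      exact this
    · intro i hi
      exact (forall_zip_tail grid (fun r s => (r.getLastD 0 == s.getLastD 0) = true)).mp hl i hi
    · intro i hi j hj
      exact (forall_mem_idx grid (fun r =>
        ∀ j < r.length - 1, (!(r.getD j 0 == r.getD (j+1) 0)) = true)).mp
        (fun s hs j' hj' => hr s hs j' hj') i hi j hj
  · rintro ⟨hd, hl, hr⟩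
    refine ⟨⟨?_, ?_⟩, ?_⟩
    · intro rs hrs j hj
      exact (forall_zip_tail grid (fun r s =>
        ∀ j < r.length - 1, (r.getD j 0 == s.getD j 0) = true)).mpr hd rs hrs j hj
    · intro rs hrs
      exact (forall_zip_tail grid (fun r s => (r.getLastD 0 == s.getLastD 0) = true)).mpr hl rs hrs
    · intro r hrm j hj
      exact (forall_mem_idx grid (fun r =>
        ∀ j < r.length - 1, (!(r.getD j 0 == r.getD (j+1) 0)) = true)).mpr hr r hrm j hj

theorem ports_agree (grid : List (List Int)) :
    satisfiesConditions grid = satisfiesConditions_alt grid := by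
  rw [Bool.eq_iff_iff, A_bits, beq_iff_eq,
    sum_eq_length_iff _ (by
      intro x hx
      obtain ⟨i, -, hxi⟩ := List.mem_flatMap.mp hx
      exact gbits_mem01 grid i x hxi),
    B_char]
  constructor
  · intro h
    have hA : ∀ i < grid.length, ∀ x ∈ gbits grid i, x = 1 := by
      intro i hi x hx
      exact h x (List.mem_flatMap.mpr ⟨i, List.mem_range.mpr hi, hx⟩)
    refine ⟨?_, ?_, ?_⟩
    · intro i hi j hj
      have := ((gbits_all_one grid i).mp (hA i (by omega))).1 (by omega) j hj
      exact ((Bool.and_eq_true _ _).mp this).1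
    · intro i hi
      exact ((gbits_all_one grid i).mp (hA i (by omega))).2.2 hi
    · intro i hi j hj
      by_cases hlast : i = grid.length - 1
      · exact ((gbits_all_one grid i).mp (hA i hi)).2.1 hlast j hj
      · have := ((gbits_all_one grid i).mp (hA i hi)).1 hlast j hj
        exact ((Bool.and_eq_true _ _).mp this).2
  · rintro ⟨hd, hl, hr⟩ x hx
    obtain ⟨i, hi, hxi⟩ := List.mem_flatMap.mp hx
    rw [List.mem_range] at hi
    refine (gbits_all_one grid i).mpr ⟨?_, ?_, ?_⟩ x hxi
    · intro hne j hj
      have hi' : i < grid.length - 1 := by omega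
      rw [Bool.and_eq_true]
      exact ⟨hd i hi' j hj, hr i hi j hj⟩
    · intro _ j hj
      exact hr i hi j hj
    · intro hi'
      exact hl i hi'

-- ===== VERDICT (by name: the statement is the Claim_ definition above) =====
theorem satisfiesConditions_spec : Claim_equal_satisfiesConditions := by
  intro grid _ _
  unfold Spec_satisfiesConditions
  exact ports_agree grid
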